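-- pv_equiv track=rewrite | github.com/HuuuNan/PLMs-in-Practical-KBQA | main/pathranking/data_process_ques.py | convert
-- ===== SOURCE A (Python) =====
-- def convert(ques,label):
--     if 'I' not in label or 'O' not in label:
--         return ques
--     result=''
--     ques=ques.split(' ')
--     label=label.split(' ')
--     index=0
--     while index!=len(ques):
--         if label[index]=='O':
--             result+=ques[index]
--             index+=1
--         else:
--             result+='<e>'
--             #找到第一个不为I的地方
--             for i in range(index,len(ques)):
--                 if label[i]=='O':
--                     index=i
--                     break
--             #考虑句子末尾的情况
--             if label[index]=='I':
--                 return result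
--         result+=' '
--     return result[:-1]
-- ===== SOURCE B (Python) =====
-- def convert(ques, label):
--     if 'I' not in label or 'O' not in label:
--         return ques
--     qs = ques.split(' ')
--     ls = label.split(' ')
--     out = []
--     prev_entity = False
--     for i in range(len(qs)):
--         if ls[i] == 'O':
--             out.append(qs[i])
--             prev_entity = False
--         else:
--             if not prev_entity:
--                 out.append('<e>')
--             prev_entity = True
--     return ' '.join(out)
-- ===== Notes on version B (the rewrite author's own statement) =====
-- stated objective: simpler
-- what changed: A's index-jumping while loop with an inner forward scan per entity run, an end-of-sentence early return and a final trailing-space strip is replaced by one flat pass over the tokens with a prev-entity flag, collecting output tokens in a list joined once at the end.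
import Mathlib
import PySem

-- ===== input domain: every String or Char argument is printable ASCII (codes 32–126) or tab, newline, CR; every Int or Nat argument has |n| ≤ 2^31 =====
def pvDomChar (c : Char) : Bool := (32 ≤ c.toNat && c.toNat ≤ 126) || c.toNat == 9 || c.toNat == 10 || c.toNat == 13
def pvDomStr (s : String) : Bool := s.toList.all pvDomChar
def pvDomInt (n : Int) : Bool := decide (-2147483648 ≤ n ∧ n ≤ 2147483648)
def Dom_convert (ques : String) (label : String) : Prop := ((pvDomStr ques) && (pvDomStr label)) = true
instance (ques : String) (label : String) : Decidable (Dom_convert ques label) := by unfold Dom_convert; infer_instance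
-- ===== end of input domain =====

-- B replaces A's index-jumping scan loop (inner scan, early return, trailing-space strip)
-- by a single flat pass with a prev-entity flag and one final join: simpler, same cost.
-- Pre_convert excludes exactly the inputs where A does not return: IndexError (label has
-- fewer space-separated tokens than ques) or an infinite loop (a final all-non-'O' label
-- run whose first token is not 'I').


-- ===== PORT A =====
-- the inner 'for i in range(index, len(ques)): if label[i]=="O": index=i; break'
def convertFind (ls : List String) (n i : Nat) : Option Nat :=
  if _h : i < n then
    if ls.getD i "" = "O" then some i else convertFind ls n (i + 1)
  else none
termination_by n - i

-- A's while loop; fuel only makes the recursion total (on non-terminating inputs, which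
-- Pre_convert excludes, it runs out and returns the accumulated result).
-- list indexing uses List.getD: Pre_convert keeps every accessed index in range
-- (Python raises IndexError outside, which Pre_convert excludes).
def convertLoop (qs ls : List String) (fuel index : Nat) (result : List Char) : List Char :=
  match fuel with
  | 0 => result
  | fuel + 1 =>
    if index = qs.length then PySem.List.slice result none (some (-1))  -- result[:-1]
    else if ls.getD index "" = "O" then
      convertLoop qs ls fuel (index + 1) ((result ++ (qs.getD index "").toList) ++ [' '])
    else
      let result' := result ++ "<e>".toList
      let index' := (convertFind ls qs.length index).getD index
      if ls.getD index' "" = "I" then result'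
      else convertLoop qs ls fuel index' (result' ++ [' '])

def convert (ques : String) (label : String) : String :=
  if !(PySem.Str.isIn "I" label) || !(PySem.Str.isIn "O" label) then ques
  else
    let qs := (PySem.Str.split? ques " ").getD []
    let ls := (PySem.Str.split? label " ").getD []
    String.ofList (convertLoop qs ls (qs.length + 1) 0 [])

-- ===== PORT B =====
def convertAltLoop (qs ls : List String) (i : Nat) (prev : Bool) (out : List String) : List String :=
  if _h : i < qs.length then
    if ls.getD i "" = "O" then convertAltLoop qs ls (i + 1) false (out ++ [qs.getD i ""])
    else if prev then convertAltLoop qs ls (i + 1) true out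
    else convertAltLoop qs ls (i + 1) true (out ++ ["<e>"])
  else out
termination_by qs.length - i

def convert_alt (ques : String) (label : String) : String :=
  if !(PySem.Str.isIn "I" label) || !(PySem.Str.isIn "O" label) then ques
  else
    let qs := (PySem.Str.split? ques " ").getD []
    let ls := (PySem.Str.split? label " ").getD []
    PySem.Str.join " " (convertAltLoop qs ls 0 false [])

-- ===== PRECONDITION & SPEC =====
-- Pre_convert excludes exactly the inputs on which A does NOT return: a label with fewer
-- tokens than ques (IndexError) and a final all-non-'O' label run not starting with 'I'
-- (infinite loop). A returns on every input satisfying Pre_convert.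
def Pre_convert (ques : String) (label : String) : Prop :=
  (¬ (PySem.Str.isIn "I" label = true) ∨ ¬ (PySem.Str.isIn "O" label = true)) ∨
  (let qs := (PySem.Str.split? ques " ").getD []
   let ls := (PySem.Str.split? label " ").getD []
   qs.length ≤ ls.length ∧
   ∀ i < qs.length, (∀ j < qs.length, i ≤ j → ls.getD j "" ≠ "O") →
     (i = 0 ∨ ls.getD (i - 1) "" = "O") → ls.getD i "" = "I")

instance (ques : String) (label : String) : Decidable (Pre_convert ques label) := by
  unfold Pre_convert; infer_instance

def pvWitness_convert : String × String := ("who is obama", "O O I")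

def Spec_convert (ques : String) (label : String) (out : String) : Prop := out = convert_alt ques label
instance (ques : String) (label : String) (out : String) : Decidable (Spec_convert ques label out) := by unfold Spec_convert; infer_instance

-- ===== CLAIM (what is proved, stated in full; the proofs are below) =====
def Claim_equal_convert : Prop := ∀ (ques : String) (label : String), Dom_convert ques label → Pre_convert ques label → Spec_convert ques label (convert ques label)

-- ===== LEMMAS AND PROOFS =====

-- proof-side view of B's pass: the list of output tokens produced from position i onward
def outF (qs ls : List String) (i : Nat) (prev : Bool) : List String :=
  if _h : i < qs.length then
    if ls.getD i "" = "O" then qs.getD i "" :: outF qs ls (i + 1) false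
    else if prev then outF qs ls (i + 1) true
    else "<e>" :: outF qs ls (i + 1) true
  else []
termination_by qs.length - i

theorem outF_stop (qs ls : List String) (i : Nat) (prev : Bool) (h : qs.length ≤ i) :
    outF qs ls i prev = [] := by
  unfold outF; simp [Nat.not_lt.mpr h]

theorem outF_ne_nil (qs ls : List String) (i : Nat) (h : i < qs.length) :
    outF qs ls i false ≠ [] := by
  unfold outF; simp only [h, dif_pos]; split <;> simp

theorem outF_true_of_O (qs ls : List String) (i : Nat) (h : ls.getD i "" = "O") :
    outF qs ls i true = outF qs ls i false := by
  unfold outF; split <;> rfl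

theorem outF_skip (qs ls : List String) :
    ∀ (k i j : Nat), j - i = k → i ≤ j → j ≤ qs.length →
    (∀ m, i ≤ m → m < j → ls.getD m "" ≠ "O") →
    outF qs ls i true = outF qs ls j true := by
  intro k
  induction k with
  | zero =>
    intro i j hk h1 _ _
    have : i = j := by omega
    subst this; rfl
  | succ k ih =>
    intro i j hk hij hjn hno
    have hi : i < j := by omega
    have hlt : i < qs.length := by omega
    have hO : ls.getD i "" ≠ "O" := hno i le_rfl hi
    rw [show outF qs ls i true = outF qs ls (i+1) true by
      rw [outF, dif_pos hlt, if_neg hO, if_pos rfl]]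
    exact ih (i+1) j (by omega) (by omega) hjn (fun m hm hm' => hno m (by omega) hm')

theorem convertFind_some (ls : List String) (n : Nat) :
    ∀ (k i j : Nat), n - i = k → convertFind ls n i = some j →
    i ≤ j ∧ j < n ∧ ls.getD j "" = "O" ∧ ∀ m, i ≤ m → m < j → ls.getD m "" ≠ "O" := by
  intro k
  induction k with
  | zero =>
    intro i j hk h
    unfold convertFind at h
    by_cases hi : i < n
    · omega
    · simp [hi] at h
  | succ k ih =>
    intro i j hk h
    unfold convertFind at h
    have hi : i < n := by omega
    rw [dif_pos hi] at h
    by_cases hO : ls.getD i "" = "O"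
    · rw [if_pos hO] at h
      cases h
      exact ⟨le_rfl, hi, hO, fun m hm hm' => by omega⟩
    · rw [if_neg hO] at h
      obtain ⟨h1, h2, h3, h4⟩ := ih (i+1) j (by omega) h
      exact ⟨by omega, h2, h3, fun m hm hm' => by
        rcases Nat.eq_or_lt_of_le hm with rfl | hlt
        · exact hO
        · exact h4 m (by omega) hm'⟩

theorem convertFind_none (ls : List String) (n : Nat) :
    ∀ (k i : Nat), n - i = k → convertFind ls n i = none →
    ∀ m, i ≤ m → m < n → ls.getD m "" ≠ "O" := by
  intro k
  induction k with
  | zero => intro i hk _ m hm hm'; omega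
  | succ k ih =>
    intro i hk h m hm hm'
    unfold convertFind at h
    have hi : i < n := by omega
    rw [dif_pos hi] at h
    by_cases hO : ls.getD i "" = "O"
    · rw [if_pos hO] at h; cases h
    · rw [if_neg hO] at h
      rcases Nat.eq_or_lt_of_le hm with rfl | hlt
      · exact hO
      · exact ih (i+1) (by omega) h m (by omega) hm'

theorem convertAltLoop_eq (qs ls : List String) :
    ∀ (k i : Nat) (prev : Bool) (out : List String), qs.length - i = k →
    convertAltLoop qs ls i prev out = out ++ outF qs ls i prev := by
  intro k
  induction k with
  | zero =>
    intro i prev out hk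
    have hi : ¬ i < qs.length := by omega
    unfold convertAltLoop outF; simp [hi]
  | succ k ih =>
    intro i prev out hk
    have hi : i < qs.length := by omega
    rw [convertAltLoop, outF, dif_pos hi, dif_pos hi]
    by_cases hO : ls.getD i "" = "O"
    · rw [if_pos hO, if_pos hO, ih (i+1) false (out ++ [qs.getD i ""]) (by omega)]
      simp
    · rw [if_neg hO, if_neg hO]
      cases prev with
      | true =>
        rw [if_pos rfl, if_pos rfl, ih (i+1) true out (by omega)]
      | false =>
        rw [if_neg (by simp), if_neg (by simp), ih (i+1) true (out ++ ["<e>"]) (by omega)]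
        simp

theorem convertLoop_eq (qs ls : List String)
    (hC : ∀ i < qs.length, (∀ j < qs.length, i ≤ j → ls.getD j "" ≠ "O") →
      (i = 0 ∨ ls.getD (i - 1) "" = "O") → ls.getD i "" = "I") :
    ∀ (fuel : Nat), ∀ (i : Nat) (res : List Char), i ≤ qs.length → qs.length - i < fuel →
    (i = 0 ∨ ls.getD (i - 1) "" = "O" ∨ ls.getD i "" = "O") →
    convertLoop qs ls fuel i res =
      if i = qs.length then res.dropLast
      else res ++ PySem.Chars.join [' '] ((outF qs ls i false).map String.toList) := by
  intro fuel
  induction fuel with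
  | zero => intro i res hi hf _; omega
  | succ f ih =>
    intro i res hi hf hinv
    by_cases hend : i = qs.length
    · rw [convertLoop, if_pos hend, if_pos hend, PySem.List.slice_to_neg_one]
    · have hlt : i < qs.length := by omega
      simp only [hend, if_false]
      by_cases hO : ls.getD i "" = "O"
      · -- O step
        have step : convertLoop qs ls (f+1) i res
            = convertLoop qs ls f (i+1) ((res ++ (qs.getD i "").toList) ++ [' ']) := by
          rw [convertLoop, if_neg hend, if_pos hO]
        rw [step, ih (i+1) _ (by omega) (by omega) (Or.inr (Or.inl (by simpa using hO)))]
        have houtF : outF qs ls i false = qs.getD i "" :: outF qs ls (i+1) false := by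
          rw [outF, dif_pos hlt, if_pos hO]
        by_cases hend2 : i + 1 = qs.length
        · rw [if_pos hend2, houtF, outF_stop qs ls (i+1) false (by omega)]
          simp [PySem.Chars.join_singleton]
        · rw [if_neg hend2, houtF]
          rcases h2 : outF qs ls (i+1) false with _ | ⟨w, ws⟩
          · exact absurd h2 (outF_ne_nil qs ls (i+1) (by omega))
          · simp [PySem.Chars.join_cons_cons]
      · -- entity run
        rcases hfind : convertFind ls qs.length i with _ | j
        · -- no later O: early return with "<e>"
          have hno := convertFind_none ls qs.length (qs.length - i) i rfl hfind
          have hI : ls.getD i "" = "I" := by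
            apply hC i hlt (fun j hj hij => hno j hij hj)
            rcases hinv with h0 | hprev | hOc
            · exact Or.inl h0
            · exact Or.inr hprev
            · exact absurd hOc hO
          have step : convertLoop qs ls (f+1) i res = res ++ "<e>".toList := by
            rw [convertLoop, if_neg hend, if_neg hO]
            dsimp only
            rw [hfind, Option.getD_none, if_pos hI]
          rw [step]
          have houtF : outF qs ls i false = "<e>" :: outF qs ls (i+1) true := by
            rw [outF, dif_pos hlt, if_neg hO, if_neg (by simp)]
          rw [houtF, outF_skip qs ls (qs.length - (i+1)) (i+1) qs.length rfl (by omega) le_rfl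
                (fun m hm hm' => hno m (by omega) hm'),
              outF_stop qs ls qs.length true le_rfl]
          simp [PySem.Chars.join_singleton]
        · -- jump to the first later O
          obtain ⟨hij, hjn, hjO, hmin⟩ := convertFind_some ls qs.length (qs.length - i) i j rfl hfind
          have hij' : i < j := by
            rcases Nat.eq_or_lt_of_le hij with rfl | h; · exact absurd hjO hO
            · exact h
          have hjI : ls.getD j "" ≠ "I" := by rw [hjO]; decide
          have step : convertLoop qs ls (f+1) i res
              = convertLoop qs ls f j ((res ++ "<e>".toList) ++ [' ']) := by
            rw [convertLoop, if_neg hend, if_neg hO]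
            dsimp only
            rw [hfind, Option.getD_some, if_neg hjI]
          rw [step, ih j _ (by omega) (by omega) (Or.inr (Or.inr hjO)),
              if_neg (by omega)]
          have houtF : outF qs ls i false = "<e>" :: outF qs ls j false := by
            have h1 : outF qs ls i false = "<e>" :: outF qs ls (i+1) true := by
              rw [outF, dif_pos hlt, if_neg hO, if_neg (by simp)]
            rw [h1, outF_skip qs ls (j - (i+1)) (i+1) j rfl (by omega) (by omega)
                  (fun m hm hm' => hmin m (by omega) hm'),
                outF_true_of_O qs ls j hjO]
          rw [houtF]
          rcases h2 : outF qs ls j false with _ | ⟨w, ws⟩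
          · exact absurd h2 (outF_ne_nil qs ls j hjn)
          · simp [PySem.Chars.join_cons_cons]

-- ===== VERDICT (by name: the statement is the Claim_ definition above) =====
theorem convert_spec : Claim_equal_convert := by
  intro ques label _hdom hpre
  unfold Spec_convert
  by_cases hguard : (!(PySem.Str.isIn "I" label) || !(PySem.Str.isIn "O" label)) = true
  · simp only [convert, convert_alt, hguard, if_pos]
  · rcases hpre with hl | hr
    · exfalso
      rcases hl with h | h <;>
        simp only [Bool.or_eq_true, Bool.not_eq_true'] at hguard <;> simp_all
    obtain ⟨_hlen, hC⟩ := hr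
    simp only [convert, convert_alt, hguard, if_neg, Bool.not_eq_true]
    set qs := (PySem.Str.split? ques " ").getD [] with hqs
    set ls := (PySem.Str.split? label " ").getD [] with hls
    rw [convertLoop_eq qs ls hC (qs.length + 1) 0 [] (by omega) (by omega) (Or.inl rfl),
        convertAltLoop_eq qs ls qs.length 0 false [] rfl]
    apply String.toList_inj.mp
    rw [String.toList_ofList, PySem.Str.toList_join]
    by_cases h0 : (0 : Nat) = qs.length
    · rw [if_pos h0, outF_stop qs ls 0 false (by omega)]
      simp [PySem.Chars.join_nil]
    · rw [if_neg h0]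
      simp only [List.nil_append]
      rfl
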